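-- pv_equiv track=rewrite | github.com/satyamsingh4406-hub/array-problem | Q21.py | k_sma
-- ===== SOURCE A (Python) =====
-- def k_sma(arr,k):
--     n=len(arr)
--     lis=[]
--     for i in range(n):
--         if arr[i] not in lis:
--             lis.append(arr[i])
--     lis.sort()
--     return lis[k-1]
-- ===== SOURCE B (Python) =====
-- def k_sma(arr, k):
--     s = sorted(arr)
--     lis = []
--     for x in s:
--         if not lis or x != lis[-1]:
--             lis.append(x)
--     return lis[k - 1]
-- ===== Notes on version B (the rewrite author's own statement) =====
-- stated objective: faster
-- what changed: replaces the O(n^2) membership-scan dedup followed by a sort with a single sort followed by a linear adjacent-duplicate scan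
import Mathlib
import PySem

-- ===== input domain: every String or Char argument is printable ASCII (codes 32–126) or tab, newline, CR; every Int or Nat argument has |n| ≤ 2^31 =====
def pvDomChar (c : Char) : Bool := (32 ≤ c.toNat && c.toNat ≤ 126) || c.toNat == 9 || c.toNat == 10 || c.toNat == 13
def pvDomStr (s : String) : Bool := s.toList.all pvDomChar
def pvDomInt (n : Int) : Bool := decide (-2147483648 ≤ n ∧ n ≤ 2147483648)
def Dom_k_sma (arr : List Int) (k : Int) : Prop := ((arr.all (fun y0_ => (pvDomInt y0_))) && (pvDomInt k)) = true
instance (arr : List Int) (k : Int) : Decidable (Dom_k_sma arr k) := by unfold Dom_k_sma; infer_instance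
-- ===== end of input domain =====

-- B replaces A's quadratic membership-scan dedup-then-sort with sort-then-adjacent-dedup (faster).

-- ===== PORT A =====
def k_sma (arr : List Int) (k : Int) : Int :=
  -- n = len(arr); lis = []; for i in range(n): if arr[i] not in lis: lis.append(arr[i])
  let lis : List Int :=
    (PySem.List.pyRange 0 (arr.length : Int) 1).foldl
      (fun lis i =>
        if PySem.List.pyGetD arr i 0 ∈ lis then lis
        else lis ++ [PySem.List.pyGetD arr i 0]) []
  -- lis.sort()
  let lis := PySem.List.sorted lis (fun x => x) false
  -- return lis[k-1]  (IndexError excluded by Pre_)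
  PySem.List.pyGetD lis (k - 1) 0

-- ===== PORT B =====
def k_sma_alt (arr : List Int) (k : Int) : Int :=
  -- s = sorted(arr)
  let s := PySem.List.sorted arr (fun x => x) false
  -- lis = []; for x in s: if not lis or x != lis[-1]: lis.append(x)
  -- (lis[-1] is only read when lis is nonempty; getLast?.getD is exact there)
  let lis : List Int :=
    s.foldl (fun lis x =>
      if lis = [] ∨ lis.getLast?.getD 0 ≠ x then lis ++ [x] else lis) []
  -- return lis[k-1]  (IndexError excluded by Pre_)
  PySem.List.pyGetD lis (k - 1) 0

-- ===== PRECONDITION & SPEC =====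
-- Pre_ excludes exactly the inputs where lis[k-1] raises IndexError: k-1 must be a valid
-- Python index into the list of distinct elements of arr.
def Pre_k_sma (arr : List Int) (k : Int) : Prop :=
  PySem.Raise.InRange (PySem.List.dedup arr).length (k - 1)
instance (arr : List Int) (k : Int) : Decidable (Pre_k_sma arr k) := by
  unfold Pre_k_sma; infer_instance

def pvWitness_k_sma : List Int × Int := ([3, 1, 2, 1], 2)

def Spec_k_sma (arr : List Int) (k : Int) (out : Int) : Prop := out = k_sma_alt arr k
instance (arr : List Int) (k : Int) (out : Int) : Decidable (Spec_k_sma arr k out) := by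
  unfold Spec_k_sma; infer_instance

-- ===== CLAIM (what is proved, stated in full; the proofs are below) =====
def Claim_equal_k_sma : Prop := ∀ (arr : List Int) (k : Int),
  Dom_k_sma arr k → Pre_k_sma arr k → Spec_k_sma arr k (k_sma arr k)

-- ===== LEMMAS AND PROOFS =====

-- A's dedup loop: the accumulator stays Nodup and collects exactly acc ∪ l.
theorem foldA_inv (l : List Int) (acc : List Int) (hacc : acc.Nodup) :
    (List.foldl (fun lis x => if x ∈ lis then lis else lis ++ [x]) acc l).Nodup ∧
    (∀ y, y ∈ List.foldl (fun lis x => if x ∈ lis then lis else lis ++ [x]) acc l ↔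
      y ∈ acc ∨ y ∈ l) := by
  induction l generalizing acc with
  | nil => simp [hacc]
  | cons x t ih =>
    simp only [List.foldl_cons]
    by_cases hx : x ∈ acc
    · simp only [hx, if_pos]
      obtain ⟨h1, h2⟩ := ih acc hacc
      refine ⟨h1, fun y => ?_⟩
      rw [h2]
      constructor
      · rintro (h | h) <;> simp [h]
      · rintro (h | h)
        · exact Or.inl h
        · rcases List.mem_cons.mp h with h | h
          · exact Or.inl (h ▸ hx)
          · exact Or.inr h
    · simp only [hx, if_neg, not_false_iff]
      have hacc' : (acc ++ [x]).Nodup :=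
        List.Nodup.append hacc (List.nodup_singleton x)
          (by simp [List.disjoint_singleton, hx])
      obtain ⟨h1, h2⟩ := ih (acc ++ [x]) hacc'
      refine ⟨h1, fun y => ?_⟩
      rw [h2]
      simp [List.mem_append, or_assoc]

-- B's adjacent-dedup loop on a ≤-sorted tail: accumulator stays strictly increasing and
-- collects exactly acc ∪ l.
theorem foldB_inv (l : List Int) (acc : List Int)
    (hl : l.Pairwise (· ≤ ·)) (hacc : acc.Pairwise (· < ·))
    (hb : ∀ a ∈ acc, ∀ b ∈ l, a ≤ b) :
    (List.foldl (fun lis x => if lis = [] ∨ lis.getLast?.getD 0 ≠ x then lis ++ [x] else lis) acc l).Pairwise (· < ·) ∧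
    (∀ y, y ∈ List.foldl (fun lis x => if lis = [] ∨ lis.getLast?.getD 0 ≠ x then lis ++ [x] else lis) acc l ↔
      y ∈ acc ∨ y ∈ l) := by
  induction l generalizing acc with
  | nil => simp [hacc]
  | cons x t ih =>
    simp only [List.foldl_cons]
    have hlt : t.Pairwise (· ≤ ·) := (List.pairwise_cons.mp hl).2
    have hxt : ∀ b ∈ t, x ≤ b := (List.pairwise_cons.mp hl).1
    by_cases hc : acc = [] ∨ acc.getLast?.getD 0 ≠ x
    · simp only [hc, if_pos]
      -- every element of acc is strictly below x
      have hmemlt : ∀ a ∈ acc, a < x := by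
        intro a ha
        have hle : a ≤ x := hb a ha x (List.mem_cons_self ..)
        rcases lt_or_eq_of_le hle with h | h
        · exact h
        · exfalso
          have hne : acc ≠ [] := List.ne_nil_of_mem ha
          rcases hc with hc | hc
          · exact hne hc
          have hlast : acc.getLast hne ∈ acc := List.getLast_mem hne
          have hlastle : acc.getLast hne ≤ x := hb _ hlast x (List.mem_cons_self ..)
          have hgd : acc.getLast?.getD 0 = acc.getLast hne := by
            simp [List.getLast?_eq_some_getLast hne]
          -- a = x, so x ≤ getLast (a is below-or-equal the last in a <-chain)
          have halast : a ≤ acc.getLast hne := by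
            rcases eq_or_ne a (acc.getLast hne) with he | hne'
            · exact le_of_eq he
            · -- acc = dropLast ++ [getLast], Pairwise < on append
              have hsplit : acc = acc.dropLast ++ [acc.getLast hne] :=
                (List.dropLast_append_getLast hne).symm
              have hp := hacc
              rw [hsplit, List.pairwise_append] at hp
              have ha' : a ∈ acc.dropLast := by
                rcases (by rw [hsplit] at ha; simpa using ha :
                    a ∈ acc.dropLast ∨ a = acc.getLast hne) with h' | h'
                · exact h'
                · exact absurd h' hne'
              exact le_of_lt (hp.2.2 a ha' _ (List.mem_singleton_self _))
          have : acc.getLast hne = x := le_antisymm hlastle (h ▸ halast)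
          exact hc (by rw [hgd, this])
      have hacc' : (acc ++ [x]).Pairwise (· < ·) := by
        rw [List.pairwise_append]
        exact ⟨hacc, List.pairwise_singleton _ _, by
          intro a ha b hbmem
          rw [List.mem_singleton] at hbmem
          exact hbmem ▸ hmemlt a ha⟩
      have hb' : ∀ a ∈ acc ++ [x], ∀ b ∈ t, a ≤ b := by
        intro a ha b hbt
        rcases List.mem_append.mp ha with h | h
        · exact hb a h b (List.mem_cons_of_mem _ hbt)
        · rw [List.mem_singleton] at h
          exact h ▸ hxt b hbt
      obtain ⟨h1, h2⟩ := ih (acc ++ [x]) hlt hacc' hb'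
      refine ⟨h1, fun y => ?_⟩
      rw [h2]
      simp [List.mem_append, or_assoc]
    · simp only [hc, if_neg, not_false_iff]
      push Not at hc
      obtain ⟨hne, hlast⟩ := hc
      have hxin : x ∈ acc := by
        have : acc.getLast?.getD 0 = acc.getLast hne := by
          simp [List.getLast?_eq_some_getLast hne]
        rw [this] at hlast
        exact hlast ▸ List.getLast_mem hne
      have hb' : ∀ a ∈ acc, ∀ b ∈ t, a ≤ b := fun a ha b hbt =>
        hb a ha b (List.mem_cons_of_mem _ hbt)
      obtain ⟨h1, h2⟩ := ih acc hlt hacc hb'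
      refine ⟨h1, fun y => ?_⟩
      rw [h2]
      constructor
      · rintro (h | h) <;> simp [h]
      · rintro (h | h)
        · exact Or.inl h
        · rcases List.mem_cons.mp h with h | h
          · exact Or.inl (h ▸ hxin)
          · exact Or.inr h

-- core equality of the two distinct-then-sorted lists
theorem sorted_dedup_eq (arr : List Int) :
    PySem.List.sorted
      ((PySem.List.pyRange 0 (arr.length : Int) 1).foldl
        (fun lis i =>
          if PySem.List.pyGetD arr i 0 ∈ lis then lis
          else lis ++ [PySem.List.pyGetD arr i 0]) []) (fun x => x) false =
    (PySem.List.sorted arr (fun x => x) false).foldl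
      (fun lis x => if lis = [] ∨ lis.getLast?.getD 0 ≠ x then lis ++ [x] else lis) [] := by
  have hA :
      (PySem.List.pyRange 0 (arr.length : Int) 1).foldl
        (fun lis i =>
          if PySem.List.pyGetD arr i 0 ∈ lis then lis
          else lis ++ [PySem.List.pyGetD arr i 0]) [] =
      arr.foldl (fun lis x => if x ∈ lis then lis else lis ++ [x]) [] :=
    PySem.List.foldl_pyRange_zero_pyGetD' arr 0
      (fun lis x => if x ∈ lis then lis else lis ++ [x]) []
  rw [hA]
  set lisA := arr.foldl (fun lis x => if x ∈ lis then lis else lis ++ [x]) [] with hlisA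
  set r := (PySem.List.sorted arr (fun x => x) false).foldl
      (fun lis x => if lis = [] ∨ lis.getLast?.getD 0 ≠ x then lis ++ [x] else lis) [] with hr
  obtain ⟨hAnodup, hAmem⟩ := foldA_inv arr [] List.nodup_nil
  have hsarr : (PySem.List.sorted arr (fun x => x) false).Pairwise (· ≤ ·) :=
    PySem.List.sorted_pairwise arr (fun x => x)
  obtain ⟨hBlt, hBmem⟩ := foldB_inv (PySem.List.sorted arr (fun x => x) false) []
    hsarr List.Pairwise.nil (by simp)
  have hBnodup : r.Nodup := hBlt.imp (fun h => ne_of_lt h)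
  have hmemiff : ∀ y, y ∈ r ↔ y ∈ lisA := by
    intro y
    rw [hBmem y, hAmem y]
    simp [PySem.List.mem_sorted]
  have hperm : r.Perm lisA :=
    (List.perm_ext_iff_of_nodup hBnodup hAnodup).mpr hmemiff
  exact PySem.List.sorted_eq_of_perm_of_pairwise_lt lisA r (fun x => x) hperm hBlt

-- ===== VERDICT (by name: the statement is the Claim_ definition above) =====
theorem k_sma_spec : Claim_equal_k_sma := by
  intro arr k _ _
  unfold Spec_k_sma k_sma k_sma_alt
  exact congrArg (fun l => PySem.List.pyGetD l (k - 1) 0) (sorted_dedup_eq arr)
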